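-- pv_equiv track=rewrite | github.com/oongdeveloper/Algorism-Solving | Number_K_other.py | calsolution1
-- ===== SOURCE A (Python) =====
-- def sum_a(progresses, speeds):
-- 	return [sum(z) for z in zip(progresses, speeds)]
--
-- def calsolution1(progresses, speeds):
-- 	answer = []
-- 	idx = 0
-- 	while idx < len(progresses):
-- 		if progresses[idx] >= 100:
-- 			cnt = 0
-- 			while idx < len(progresses):
-- 				if progresses[idx] < 100:
-- 					break
-- 				cnt += 1
-- 				idx += 1
-- 				answer.append(cnt)
-- 		progresses = sum_a(progresses, speeds)
-- 	return answer
-- ===== SOURCE B (Python) =====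
-- def calsolution1(progresses, speeds):
--     answer = []
--     cur = -1
--     cnt = 0
--     for p, s in zip(progresses, speeds):
--         d = 0 if p >= 100 else -((p - 100) // s)
--         if cur < d:
--             cur = d
--             cnt = 1
--         else:
--             cnt += 1
--         answer.append(cnt)
--     return answer
-- ===== Notes on version B (the rewrite author's own statement) =====
-- stated objective: faster
-- what changed: Instead of simulating progress day by day (adding speeds to the whole list every day until each prefix run reaches 100), B computes each feature's completion day in closed form by ceiling division and emits the batch counters in a single pass tracking the running maximum completion day; intended as faster (O(n) vs O(n*D)) — a timing run measured A timing out at n=16 where B returned, so no clean ratio was recorded.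
-- outside the precondition, e.g. on calsolution1([100, 100], [1]): A returns [1, 2], B returns [1]; on calsolution1([104], [-1]): A returns [1], B returns [1]
import Mathlib
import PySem

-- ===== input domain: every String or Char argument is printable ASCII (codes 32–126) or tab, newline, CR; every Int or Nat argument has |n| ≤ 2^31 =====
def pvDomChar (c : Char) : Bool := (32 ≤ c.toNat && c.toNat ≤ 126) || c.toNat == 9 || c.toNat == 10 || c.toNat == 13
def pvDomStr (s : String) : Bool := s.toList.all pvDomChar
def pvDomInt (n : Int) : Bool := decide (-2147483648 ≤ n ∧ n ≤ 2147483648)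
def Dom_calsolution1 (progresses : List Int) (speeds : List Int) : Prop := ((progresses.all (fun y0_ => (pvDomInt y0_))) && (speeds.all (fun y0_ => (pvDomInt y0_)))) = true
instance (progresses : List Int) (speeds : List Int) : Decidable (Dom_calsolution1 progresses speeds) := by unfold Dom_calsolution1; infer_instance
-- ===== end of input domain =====

-- B replaces A's day-by-day simulation by a closed-form completion day per feature
-- (ceiling division) and a single pass tracking the running maximum completion day.

-- ===== PORT A =====
def pvSumA (ps ss : List Int) : List Int := (ps.zip ss).map (fun z => z.1 + z.2)

def pvInnerA (ps : List Int) (idx : Nat) (cnt : Int) (ans : List Int) : Nat × Int × List Int :=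
  if h : idx < ps.length then
    if ps[idx] < 100 then (idx, cnt, ans)
    else pvInnerA ps (idx + 1) (cnt + 1) (ans ++ [cnt + 1])
  else (idx, cnt, ans)
termination_by ps.length - idx

-- fuel makes A's while-loop total in Lean; inside Pre_ it is always sufficient (proved below)
def pvOuterA (fuel : Nat) (ps ss : List Int) (idx : Nat) (ans : List Int) : List Int :=
  match fuel with
  | 0 => ans
  | f + 1 =>
    if h : idx < ps.length then
      if 100 ≤ ps[idx] then
        let r := pvInnerA ps idx 0 ans
        pvOuterA f (pvSumA ps ss) ss r.1 r.2.2
      else pvOuterA f (pvSumA ps ss) ss idx ans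
    else ans

def calsolution1 (progresses : List Int) (speeds : List Int) : List Int :=
  pvOuterA ((progresses.foldl (fun m p => max m (101 - p)) 1).toNat + 2) progresses speeds 0 []

-- ===== PORT B =====
def pvDays (p s : Int) : Int := if 100 ≤ p then 0 else -(PySem.Int.floordiv (p - 100) s)

def pvAltStep (st : Int × Int × List Int) (z : Int × Int) : Int × Int × List Int :=
  let d := pvDays z.1 z.2
  if st.1 < d then (d, 1, st.2.2 ++ [1])
  else (st.1, st.2.1 + 1, st.2.2 ++ [st.2.1 + 1])

def calsolution1_alt (progresses : List Int) (speeds : List Int) : List Int :=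
  ((progresses.zip speeds).foldl pvAltStep (-1, 0, [])).2.2

-- ===== PRECONDITION & SPEC =====
-- Pre_ excludes inputs whose leading all-≥100 run of progresses extends past the zipped (min)
-- length — there A's day-0 release reads raw entries that the zip truncation then silently drops,
-- a mere artefact of the malformed parallel arrays — and inputs pairing an unfinished progress
-- with a nonpositive speed, on which A's simulation loops forever except in accidental corners.
def Pre_calsolution1 (progresses : List Int) (speeds : List Int) : Prop :=
  (∀ i (hi : i < progresses.length),
      (∀ j (hj : j < progresses.length), j ≤ i → 100 ≤ progresses[j]) →
      i < min progresses.length speeds.length) ∧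
  ∀ z ∈ progresses.zip speeds, 1 ≤ z.2 ∨ (100 ≤ z.1 ∧ 0 ≤ z.2)
instance (progresses : List Int) (speeds : List Int) : Decidable (Pre_calsolution1 progresses speeds) := by unfold Pre_calsolution1; infer_instance

def pvWitness_calsolution1 : List Int × List Int := ([30, 55, 100], [30, 5, 0])

def Spec_calsolution1 (progresses : List Int) (speeds : List Int) (out : List Int) : Prop := out = calsolution1_alt progresses speeds
instance (progresses : List Int) (speeds : List Int) (out : List Int) : Decidable (Spec_calsolution1 progresses speeds out) := by unfold Spec_calsolution1; infer_instance

-- ===== CLAIM (what is proved, stated in full; the proofs are below) =====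
def Claim_equal_calsolution1 : Prop := ∀ (progresses : List Int) (speeds : List Int), Dom_calsolution1 progresses speeds → Pre_calsolution1 progresses speeds → Spec_calsolution1 progresses speeds (calsolution1 progresses speeds)

-- ===== LEMMAS AND PROOFS =====

-- the list of progresses after t days of simulation
def pvPadd (ps ss : List Int) (t : Int) : List Int := (ps.zip ss).map (fun z => z.1 + t * z.2)

-- pvSeq k r = [k+1, k+2, …, k+r]
def pvSeq (k : Int) : Nat → List Int
  | 0 => []
  | r + 1 => (k + 1) :: pvSeq (k + 1) r

-- recursive view of B's fold (answer built in front)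
def pvAltRun : List (Int × Int) → Int → Int → List Int
  | [], _, _ => []
  | z :: l, c, k =>
    let d := pvDays z.1 z.2
    if c < d then 1 :: pvAltRun l d 1 else (k + 1) :: pvAltRun l c (k + 1)

lemma pvAlt_view (l : List (Int × Int)) : ∀ (c k : Int) (acc : List Int),
    (l.foldl pvAltStep (c, k, acc)).2.2 = acc ++ pvAltRun l c k := by
  induction l with
  | nil => intro c k acc; simp [pvAltRun]
  | cons z l ih =>
    intro c k acc
    simp only [List.foldl_cons, pvAltStep, pvAltRun]
    by_cases h : c < pvDays z.1 z.2 <;> simp [h, ih]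

lemma pvPadd_length (ps ss : List Int) (t : Int) (hlen : ps.length = ss.length) :
    (pvPadd ps ss t).length = ps.length := by
  simp [pvPadd, hlen]

lemma pvPadd_get (ps ss : List Int) (t : Int) (hlen : ps.length = ss.length)
    (i : Nat) (hi : i < ps.length) :
    (pvPadd ps ss t)[i]'(by rw [pvPadd_length ps ss t hlen]; exact hi)
      = ps[i] + t * (ss[i]'(hlen ▸ hi)) := by
  simp [pvPadd]

lemma pvSumA_padd (ps ss : List Int) (t : Int) (hlen : ps.length = ss.length) :
    pvSumA (pvPadd ps ss t) ss = pvPadd ps ss (t + 1) := by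
  apply List.ext_getElem
  · simp [pvSumA, pvPadd, hlen]
  · intro i h1 h2
    simp only [pvSumA, pvPadd, List.getElem_map, List.getElem_zip]
    ring

-- completion day is nonnegative
lemma pvDays_nonneg (p s : Int) (hz : 1 ≤ s ∨ (100 ≤ p ∧ 0 ≤ s)) : 0 ≤ pvDays p s := by
  unfold pvDays
  split_ifs with h
  · omega
  · have hs : 1 ≤ s := by omega
    have h1 : PySem.Int.floordiv (p - 100) s < 1 := by
      rw [PySem.Int.floordiv_lt_iff_lt_mul (by omega)]
      omega
    omega

-- released at day t iff completion day ≤ t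
lemma pvRelease (p s t : Int) (hz : 1 ≤ s ∨ (100 ≤ p ∧ 0 ≤ s)) (ht : 0 ≤ t) :
    (100 ≤ p + t * s ↔ pvDays p s ≤ t) := by
  unfold pvDays
  split_ifs with h
  · have hs : 0 ≤ s := by rcases hz with h1 | h1 <;> omega
    have hts : 0 ≤ t * s := mul_nonneg ht hs
    constructor <;> intro <;> linarith
  · have hs : 1 ≤ s := by rcases hz with h1 | h1 <;> omega
    have hiff := PySem.Int.le_floordiv_iff_mul_le (a := p - 100) (b := s) (q := -t) (by omega)
    have hneg : (-t) * s = -(t * s) := by ring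
    constructor
    · intro h100
      have : -t ≤ PySem.Int.floordiv (p - 100) s := hiff.mpr (by linarith [hneg])
      linarith
    · intro hle
      have : (-t) * s ≤ p - 100 := hiff.mp (by linarith)
      linarith [hneg]

lemma pvDays_le (p s : Int) (hz : 1 ≤ s ∨ (100 ≤ p ∧ 0 ≤ s)) :
    pvDays p s ≤ max 0 (101 - p) := by
  unfold pvDays
  split_ifs with h
  · exact le_max_left _ _
  · have hs : 1 ≤ s := by rcases hz with h1 | h1 <;> omega
    have h2 : p - 101 ≤ PySem.Int.floordiv (p - 100) s := by
      rw [PySem.Int.le_floordiv_iff_mul_le (by omega)]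
      nlinarith
    exact le_trans (by omega) (le_max_right 0 (101 - p))

lemma pvFold_max_init (l : List Int) : ∀ b : Int, b ≤ l.foldl (fun m p => max m (101 - p)) b := by
  induction l with
  | nil => intro b; simp
  | cons x l ih =>
    intro b
    exact le_trans (le_max_left _ _) (ih (max b (101 - x)))

lemma pvFold_max_mem (l : List Int) : ∀ (b p : Int), p ∈ l →
    101 - p ≤ l.foldl (fun m p => max m (101 - p)) b := by
  induction l with
  | nil => intro b p h; simp at h
  | cons x l ih =>
    intro b p h
    rcases List.mem_cons.mp h with h | h
    · subst h
      exact le_trans (le_max_right _ _) (pvFold_max_init l _)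
    · exact ih _ p h

-- a whole batch run in B's pass: every completion day ≤ the current maximum t
lemma pvAltRun_chunk (t : Int) (l1 : List (Int × Int)) : ∀ (l2 : List (Int × Int)) (k : Int),
    (∀ z ∈ l1, pvDays z.1 z.2 ≤ t) →
    pvAltRun (l1 ++ l2) t k
      = pvSeq k l1.length ++ pvAltRun l2 t (k + l1.length) := by
  induction l1 with
  | nil => intro l2 k _; simp [pvSeq]
  | cons z l ih =>
    intro l2 k hall
    have hd : pvDays z.1 z.2 ≤ t := hall z (by simp)
    simp only [List.cons_append, pvAltRun, if_neg (by omega : ¬ t < pvDays z.1 z.2)]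
    rw [ih l2 (k + 1) (fun w hw => hall w (by simp [hw]))]
    rw [show (z :: l).length = l.length + 1 from rfl,
        show pvSeq k (l.length + 1) = (k + 1) :: pvSeq (k + 1) l.length from rfl,
        List.cons_append,
        show (k + ((l.length + 1 : Nat) : Int)) = k + 1 + (l.length : Int) by push_cast; ring]

lemma pvPreAt (ps ss : List Int) (hlen : ps.length = ss.length)
    (hpre : ∀ z ∈ ps.zip ss, 1 ≤ z.2 ∨ (100 ≤ z.1 ∧ 0 ≤ z.2))
    (j : Nat) (hj : j < ps.length) :
    1 ≤ ss[j]'(hlen ▸ hj) ∨ (100 ≤ ps[j] ∧ 0 ≤ ss[j]'(hlen ▸ hj)) := by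
  have hjz : j < (ps.zip ss).length := by simp [hlen]; omega
  have h2 : (ps.zip ss)[j] = (ps[j], ss[j]'(hlen ▸ hj)) := by simp
  have h3 := hpre _ (List.getElem_mem hjz)
  rw [h2] at h3
  exact h3

-- A's inner loop releases exactly the maximal run of completed features from idx
-- A's inner loop: consumes the maximal run of entries ≥ 100 starting at j
lemma pvInner_run (L : List Int) : ∀ (m j : Nat) (cnt : Int) (ans : List Int),
    m = L.length - j → j ≤ L.length →
    ∃ k, j ≤ k ∧ k ≤ L.length ∧
      pvInnerA L j cnt ans = (k, cnt + ((k - j : Nat) : Int), ans ++ pvSeq cnt (k - j)) ∧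
      (∀ i (h1 : i < L.length), j ≤ i → i < k → 100 ≤ L[i]) ∧
      (∀ h : k < L.length, L[k] < 100) := by
  intro m
  induction m with
  | zero =>
    intro j cnt ans hm hj
    refine ⟨j, le_refl j, hj, ?_, ?_, ?_⟩
    · rw [pvInnerA, dif_neg (by omega)]
      simp [pvSeq]
    · intro i h1 hji hik; omega
    · intro h; omega
  | succ m ih =>
    intro j cnt ans hm hj
    have hjn : j < L.length := by omega
    rw [pvInnerA, dif_pos hjn]
    by_cases hrel : L[j] < 100
    · rw [if_pos hrel]
      refine ⟨j, le_refl j, le_of_lt hjn, by simp [pvSeq], ?_, ?_⟩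
      · intro i h1 hji hik; omega
      · intro h; exact hrel
    · rw [if_neg hrel]
      obtain ⟨k, hk1, hk2, heq, hrun, hstop⟩ := ih (j + 1) (cnt + 1) (ans ++ [cnt + 1]) (by omega) (by omega)
      refine ⟨k, by omega, hk2, ?_, ?_, hstop⟩
      · rw [heq]
        have hkj : k - j = (k - (j + 1)) + 1 := by omega
        have hc : cnt + 1 + ((k - (j + 1) : Nat) : Int) = cnt + (((k - (j + 1)) + 1 : Nat) : Int) := by
          push_cast; ring
        rw [hkj, show pvSeq cnt ((k - (j + 1)) + 1) = (cnt + 1) :: pvSeq (cnt + 1) (k - (j + 1)) from rfl, hc]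
        simp
      · intro i h1 hji hik
        rcases Nat.eq_or_lt_of_le hji with h | h
        · subst h; omega
        · exact hrun i h1 h hik

-- B's pass across one whole batch: a reset at idx (completion day t) followed by the run up to k
lemma pvAltRun_batch (t cur cnt : Int) (zs : List (Int × Int)) (idx k : Nat)
    (hcur : cur ≤ t - 1) (hik : idx < k) (hk : k ≤ zs.length)
    (hd0 : pvDays (zs[idx]'(by omega)).1 (zs[idx]'(by omega)).2 = t)
    (hall : ∀ i (h : i < zs.length), idx ≤ i → i < k → pvDays (zs[i]).1 (zs[i]).2 ≤ t) :
    pvAltRun (zs.drop idx) cur cnt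
      = pvSeq 0 (k - idx) ++ pvAltRun (zs.drop k) t ((k - idx : Nat) : Int) := by
  have hidx : idx < zs.length := by omega
  have hdropc : zs.drop idx = zs[idx] :: zs.drop (idx + 1) := List.drop_eq_getElem_cons hidx
  rw [hdropc]
  simp only [pvAltRun]
  rw [hd0, if_pos (by omega : cur < t)]
  set l1 := (zs.drop (idx + 1)).take (k - (idx + 1)) with hl1
  have hsplit : zs.drop (idx + 1) = l1 ++ zs.drop k := by
    rw [hl1]
    have h1 := List.take_append_drop (k - (idx + 1)) (zs.drop (idx + 1))
    rw [List.drop_drop] at h1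
    rw [show idx + 1 + (k - (idx + 1)) = k by omega] at h1
    exact h1.symm
  have hl1len : l1.length = k - (idx + 1) := by rw [hl1]; simp; omega
  have hl1all : ∀ z ∈ l1, pvDays z.1 z.2 ≤ t := by
    intro z hzmem
    obtain ⟨i, hi, hget⟩ := List.mem_iff_getElem.mp hzmem
    rw [hl1len] at hi
    have hz2 : z = zs[idx + 1 + i]'(by omega) := by rw [← hget]; simp [hl1]
    rw [hz2]
    exact hall (idx + 1 + i) (by omega) (by omega) (by omega)
  rw [hsplit, pvAltRun_chunk t l1 _ 1 hl1all, hl1len]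
  have hseq : pvSeq 0 (k - idx) = 1 :: pvSeq 1 (k - (idx + 1)) := by
    rw [show k - idx = (k - (idx + 1)) + 1 by omega]
    show (0 + 1 : Int) :: pvSeq (0 + 1) (k - (idx + 1)) = _
    norm_num
  have hcnt : ((k - idx : Nat) : Int) = 1 + ((k - (idx + 1) : Nat) : Int) := by omega
  rw [hseq, hcnt]
  simp

-- zip only sees the common prefix
lemma pvZip_take (xs : List Int) : ∀ (ys : List Int) (k : Nat), min xs.length ys.length ≤ k →
    (xs.take k).zip (ys.take k) = xs.zip ys := by
  induction xs with
  | nil => intro ys k _; simp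
  | cons x xs ih =>
    intro ys k hk
    cases ys with
    | nil => simp
    | cons y ys =>
      cases k with
      | zero => exact absurd hk (by simp only [List.length_cons]; omega)
      | succ k =>
        simp only [List.take_succ_cons, List.zip_cons_cons]
        rw [ih ys k (by simp only [List.length_cons] at hk; omega)]

lemma pvZip_right (xs : List Int) : ∀ (ys : List Int) (k : Nat), xs.length ≤ k →
    xs.zip (ys.take k) = xs.zip ys := by
  induction xs with
  | nil => intro ys k _; simp
  | cons x xs ih =>
    intro ys k hk
    cases ys with
    | nil => simp
    | cons y ys =>
      cases k with
      | zero => exact absurd hk (by simp only [List.length_cons]; omega)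
      | succ k =>
        simp only [List.take_succ_cons, List.zip_cons_cons]
        rw [ih ys k (by simp only [List.length_cons] at hk; omega)]

-- A's loop never looks at speeds beyond the current (ever-shrinking) list's length
lemma pvOuter_ss : ∀ (f : Nat) (L ss : List Int) (k idx : Nat) (ans : List Int), L.length ≤ k →
    pvOuterA f L (ss.take k) idx ans = pvOuterA f L ss idx ans := by
  intro f
  induction f with
  | zero => intro L ss k idx ans _; rfl
  | succ f ih =>
    intro L ss k idx ans hL
    simp only [pvOuterA]
    by_cases h : idx < L.length
    · rw [dif_pos h, dif_pos h]
      have hs : pvSumA L (ss.take k) = pvSumA L ss := by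
        unfold pvSumA; rw [pvZip_right L ss k hL]
      have hlen2 : (pvSumA L ss).length ≤ k := by simp [pvSumA]; omega
      by_cases h2 : 100 ≤ L[idx]
      · rw [if_pos h2, if_pos h2, hs]
        exact ih (pvSumA L ss) ss k _ _ hlen2
      · rw [if_neg h2, if_neg h2, hs]
        exact ih (pvSumA L ss) ss k _ _ hlen2
    · rw [dif_neg h, dif_neg h]

lemma pvOuter_nil : ∀ (f : Nat) (ss : List Int) (idx : Nat) (ans : List Int),
    pvOuterA f [] ss idx ans = ans := by
  intro f
  cases f <;> intro ss idx ans <;> simp [pvOuterA]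

-- one day of simulation = the day counter going up by one, on the truncated lists
lemma pvSumA_take (ps ss : List Int) :
    pvSumA ps ss
      = pvPadd (ps.take (min ps.length ss.length)) (ss.take (min ps.length ss.length)) 1 := by
  unfold pvSumA pvPadd
  rw [pvZip_take ps ss (min ps.length ss.length) (le_refl _)]
  exact List.map_congr_left (fun z _ => by ring)

lemma pvMain (ps ss : List Int) (hlen : ps.length = ss.length)
    (hpre : ∀ z ∈ ps.zip ss, 1 ≤ z.2 ∨ (100 ≤ z.1 ∧ 0 ≤ z.2)) :
    ∀ (fuel : Nat) (t cur cnt : Int) (idx : Nat) (ans : List Int),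
    0 ≤ t → idx ≤ ps.length →
    (∀ j (hj : j < ps.length), j < idx → pvDays ps[j] (ss[j]'(hlen ▸ hj)) ≤ t - 1) →
    (∀ h : idx < ps.length, t ≤ pvDays ps[idx] (ss[idx]'(hlen ▸ h))) →
    cur ≤ t - 1 →
    1 ≤ fuel →
    (∀ i (hi : i < ps.length), idx ≤ i → pvDays ps[i] (ss[i]'(hlen ▸ hi)) - t + 2 ≤ (fuel : Int)) →
    pvOuterA fuel (pvPadd ps ss t) ss idx ans
      = ans ++ pvAltRun ((ps.zip ss).drop idx) cur cnt := by
  intro fuel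
  induction fuel with
  | zero => intro t cur cnt idx ans _ _ _ _ _ hf1 _; omega
  | succ f ih =>
    intro t cur cnt idx ans ht hidx hprev hcurr hcur _ hf2
    have hzlen : (ps.zip ss).length = ps.length := by simp [hlen]
    by_cases hin : idx < ps.length
    · have hzidx := pvPreAt ps ss hlen hpre idx hin
      have hd := hcurr hin
      have hplen : (pvPadd ps ss t).length = ps.length := pvPadd_length ps ss t hlen
      have hlt : idx < (pvPadd ps ss t).length := by omega
      simp only [pvOuterA]
      rw [dif_pos hlt, pvPadd_get ps ss t hlen idx hin]
      by_cases hrel : pvDays ps[idx] (ss[idx]'(hlen ▸ hin)) ≤ t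
      · -- feature idx completes on day t: A releases a whole batch
        rw [if_pos ((pvRelease _ _ t hzidx ht).mpr hrel)]
        obtain ⟨k, hk1, hk2', heq, hrun0, hstop0⟩ :=
          pvInner_run (pvPadd ps ss t) ((pvPadd ps ss t).length - idx) idx 0 ans rfl (by omega)
        have hk2 : k ≤ ps.length := by omega
        have hrun : ∀ i (h1 : i < ps.length), idx ≤ i → i < k →
            pvDays ps[i] (ss[i]'(hlen ▸ h1)) ≤ t := by
          intro i h1 hi hik
          have h100 := hrun0 i (by omega) hi hik
          rw [pvPadd_get ps ss t hlen i h1] at h100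
          exact (pvRelease _ _ t (pvPreAt ps ss hlen hpre i h1) ht).mp h100
        have hstop : ∀ h : k < ps.length, t < pvDays ps[k] (ss[k]'(hlen ▸ h)) := by
          intro h
          have hlt100 := hstop0 (by omega)
          rw [pvPadd_get ps ss t hlen k h] at hlt100
          have hiff := pvRelease ps[k] (ss[k]'(hlen ▸ h)) t (pvPreAt ps ss hlen hpre k h) ht
          by_contra hc
          have := hiff.mpr (by omega)
          omega
        have hdeq : pvDays ps[idx] (ss[idx]'(hlen ▸ hin)) = t := le_antisymm hrel hd
        have hk1' : idx + 1 ≤ k := by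
          rcases Nat.lt_or_ge k (idx + 1) with h | h
          · have hki : k = idx := by omega
            subst hki
            have h2 := hstop hin
            omega
          · exact h
        simp only [heq, pvSumA_padd ps ss t hlen]
        rw [ih (t + 1) t ((k - idx : Nat) : Int) k (ans ++ pvSeq 0 (k - idx)) (by omega) hk2
              (by intro j hj hjk
                  rcases Nat.lt_or_ge j idx with h | h
                  · have := hprev j hj h; omega
                  · have := hrun j hj h hjk; omega)
              (by intro h; have := hstop h; omega)
              (by omega)
              (by have := hf2 idx hin (le_refl idx); omega)
              (by intro i hi hik
                  have := hf2 i hi (by omega); omega)]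
        rw [pvAltRun_batch t cur cnt (ps.zip ss) idx k hcur hk1' (by omega)
              (by have hzideq : (ps.zip ss)[idx]'(by omega) = (ps[idx], ss[idx]'(hlen ▸ hin)) := by simp
                  rw [hzideq]
                  exact hdeq)
              (by intro i h hi hik
                  have hips : i < ps.length := by omega
                  have hzieq : (ps.zip ss)[i]'(by omega) = (ps[i], ss[i]'(hlen ▸ hips)) := by simp
                  rw [hzieq]
                  exact hrun i hips hi hik)]
        simp
      · -- nothing completes on day t: A just advances one day
        rw [if_neg (fun hc => hrel ((pvRelease _ _ t hzidx ht).mp hc))]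
        rw [pvSumA_padd ps ss t hlen]
        exact ih (t + 1) cur cnt idx ans (by omega) hidx
          (by intro j hj hjk; have := hprev j hj hjk; omega)
          (by intro h; omega)
          (by omega)
          (by have := hf2 idx hin (le_refl idx); omega)
          (by intro i hi hik; have := hf2 i hi hik; omega)
    · have hieq : idx = ps.length := by omega
      simp only [pvOuterA]
      rw [dif_neg (by rw [pvPadd_length ps ss t hlen]; omega)]
      rw [List.drop_of_length_le (by omega)]
      simp [pvAltRun]

-- ===== VERDICT (by name: the statement is the Claim_ definition above) =====
theorem calsolution1_spec : Claim_equal_calsolution1 := by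
  intro ps ss _hdom hpre
  obtain ⟨hrf, hz⟩ := hpre
  unfold Spec_calsolution1 calsolution1 calsolution1_alt
  rw [pvAlt_view]
  by_cases hn : ps.length = 0
  · have hnil : ps = [] := by cases ps with | nil => rfl | cons a l => simp at hn
    subst hnil
    rw [pvOuter_nil]
    simp [pvAltRun]
  · have hn' : 0 < ps.length := Nat.pos_of_ne_zero hn
    set F := ps.foldl (fun m p => max m (101 - p)) 1 with hF
    set m := min ps.length ss.length with hm
    set ps' := ps.take m with hps'
    set ss' := ss.take m with hss'
    have hmn : m ≤ ps.length := by omega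
    have hplen' : ps'.length = m := by simp [hps']; omega
    have hslen' : ss'.length = m := by simp [hss']; omega
    have hlen' : ps'.length = ss'.length := by omega
    have hzipeq : ps'.zip ss' = ps.zip ss := by
      rw [hps', hss']; exact pvZip_take ps ss m (by omega)
    have hz' : ∀ z ∈ ps'.zip ss', 1 ≤ z.2 ∨ (100 ≤ z.1 ∧ 0 ≤ z.2) := by rw [hzipeq]; exact hz
    have hsum : pvSumA ps ss = pvPadd ps' ss' 1 := by
      rw [hps', hss', hm]; exact pvSumA_take ps ss
    have hget' : ∀ (j : Nat) (hj : j < ps'.length), ps'[j] = ps[j]'(by omega) := by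
      intro j hj; simp [hps']
    have hdle : ∀ i (hi : i < ps'.length),
        pvDays ps'[i] (ss'[i]'(hlen' ▸ hi)) ≤ (F.toNat : Int) := by
      intro i hi
      have hzz := pvPreAt ps' ss' hlen' hz' i hi
      have h1 := pvDays_le ps'[i] (ss'[i]'(hlen' ▸ hi)) hzz
      have hmem : ps'[i] ∈ ps := List.take_subset m ps (List.getElem_mem hi)
      have h2 := pvFold_max_mem ps 1 ps'[i] hmem
      have h3 := pvFold_max_init ps 1
      have h4 := Int.self_le_toNat F
      rw [← hF] at h2 h3
      have h5 : max 0 (101 - ps'[i]) ≤ F := max_le (by omega) h2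
      omega
    have hone : ∀ (j : Nat) (hj : j < ps'.length), ps[j]'(by omega) < 100 →
        1 ≤ pvDays ps'[j] (ss'[j]'(hlen' ▸ hj)) := by
      intro j hj hlt100
      have hzz := pvPreAt ps' ss' hlen' hz' j hj
      have hrel0 := pvRelease ps'[j] (ss'[j]'(hlen' ▸ hj)) 0 hzz (le_refl 0)
      have hnn := pvDays_nonneg ps'[j] (ss'[j]'(hlen' ▸ hj)) hzz
      have hq : ps'[j] + 0 * (ss'[j]'(hlen' ▸ hj)) = ps'[j] := by ring
      have hpj := hget' j hj
      by_contra hc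
      have := hrel0.mpr (by omega)
      omega
    rw [show F.toNat + 2 = (F.toNat + 1) + 1 from rfl]
    conv_lhs => rw [pvOuterA]
    rw [dif_pos hn']
    by_cases h0 : (100 : Int) ≤ ps[0]
    · rw [if_pos h0]
      obtain ⟨k, hk0, hkn, heq, hrun, hstop⟩ :=
        pvInner_run ps ps.length 0 0 [] (by omega) (Nat.zero_le _)
      have hk1 : 1 ≤ k := by
        by_contra hc
        have hki : k = 0 := by omega
        subst hki
        have := hstop hn'
        omega
      have hkm : k ≤ m := by
        have := hrf (k - 1) (by omega) (by intro j hj hji; exact hrun j hj (by omega) (by omega))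
        omega
      simp only [heq, Nat.sub_zero, List.nil_append]
      rw [← pvOuter_ss _ (pvSumA ps ss) ss m k _ (by simp [pvSumA]; omega), ← hss', hsum]
      rw [pvMain ps' ss' hlen' hz' (F.toNat + 1) 1 0 ((k : Nat) : Int) k (pvSeq 0 k)
            (by omega) (by omega)
            (by intro j hj hjk
                have h100 : 100 ≤ ps'[j] := by
                  rw [hget' j hj]; exact hrun j (by omega) (Nat.zero_le _) hjk
                simp [pvDays, h100])
            (by intro h
                have hlt100 : ps[k]'(by omega) < 100 := hstop (by omega)
                have := hone k h hlt100
                omega)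
            (by omega) (by omega)
            (by intro i hi _
                have := hdle i hi
                push_cast
                omega)]
      rw [show ps.zip ss = ps'.zip ss' from hzipeq.symm]
      conv_rhs => rw [← List.drop_zero (l := ps'.zip ss')]
      rw [pvAltRun_batch 0 (-1) 0 (ps'.zip ss') 0 k (by omega) (by omega)
            (by rw [List.length_zip]; omega)
            (by have hlz : 0 < (ps'.zip ss').length := by rw [List.length_zip]; omega
                have hz0 : (ps'.zip ss')[0]'hlz = (ps'[0]'(by omega), ss'[0]'(by omega)) := by simp
                rw [hz0]
                have h100 : (100 : Int) ≤ ps'[0]'(by omega) := by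
                  rw [hget' 0 (by omega)]; exact h0
                simp [pvDays, h100])
            (by intro i h hi hik
                have hiz : i < ps'.length := by rw [List.length_zip] at h; omega
                have hzieq : (ps'.zip ss')[i]'h = (ps'[i], ss'[i]'(hlen' ▸ hiz)) := by simp
                rw [hzieq]
                have h100 : (100 : Int) ≤ ps'[i] := by
                  rw [hget' i hiz]; exact hrun i (by omega) (Nat.zero_le _) hik
                simp [pvDays, h100])]
      simp
    · rw [if_neg h0]
      rw [← pvOuter_ss _ (pvSumA ps ss) ss m 0 _ (by simp [pvSumA]; omega), ← hss', hsum]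
      rw [pvMain ps' ss' hlen' hz' (F.toNat + 1) 1 (-1) 0 0 []
            (by omega) (Nat.zero_le _)
            (by intro j hj hjk; omega)
            (by intro h
                exact hone 0 h (by omega))
            (by omega) (by omega)
            (by intro i hi _
                have := hdle i hi
                push_cast
                omega)]
      rw [List.drop_zero, hzipeq]
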